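-- pv_equiv track=rewrite | github.com/akashg401/pdf-spliter | app.py | compute_invoice_ranges
-- ===== SOURCE A (Python) =====
-- from typing import Tuple, Dict, List
--
-- def compute_invoice_ranges(start_pages: List[int], total_pages: int) -> List[Tuple[int, int]]:
--     """
--     Given 0-based start pages and total pages, return list of (start, end)
--     page ranges (0-based, inclusive).
--     """
--     ranges: List[Tuple[int, int]] = []
--     for idx, start in enumerate(start_pages):
--         if idx < len(start_pages) - 1:
--             end = start_pages[idx + 1] - 1
--         else:
--             end = total_pages - 1
--         ranges.append((start, end))
--     return ranges
-- ===== SOURCE B (Python) =====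
-- from typing import Tuple, List
--
-- def compute_invoice_ranges(start_pages: List[int], total_pages: int) -> List[Tuple[int, int]]:
--     # Walk the starts back-to-front, threading the exclusive upper boundary
--     # of the current range through an accumulator; reverse at the end.
--     out: List[Tuple[int, int]] = []
--     bound = total_pages
--     for s in reversed(start_pages):
--         out.append((s, bound - 1))
--         bound = s
--     out.reverse()
--     return out
-- ===== Notes on version B (the rewrite author's own statement) =====
-- stated objective: alternative
-- what changed: B builds the result back-to-front: it traverses the starts in reverse, threading the next range's exclusive boundary through an accumulator (seeded with total_pages) and reversing the output, which eliminates A's enumerate/index-bounds branch and per-iteration indexed lookahead start_pages[idx+1].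
import Mathlib
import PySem

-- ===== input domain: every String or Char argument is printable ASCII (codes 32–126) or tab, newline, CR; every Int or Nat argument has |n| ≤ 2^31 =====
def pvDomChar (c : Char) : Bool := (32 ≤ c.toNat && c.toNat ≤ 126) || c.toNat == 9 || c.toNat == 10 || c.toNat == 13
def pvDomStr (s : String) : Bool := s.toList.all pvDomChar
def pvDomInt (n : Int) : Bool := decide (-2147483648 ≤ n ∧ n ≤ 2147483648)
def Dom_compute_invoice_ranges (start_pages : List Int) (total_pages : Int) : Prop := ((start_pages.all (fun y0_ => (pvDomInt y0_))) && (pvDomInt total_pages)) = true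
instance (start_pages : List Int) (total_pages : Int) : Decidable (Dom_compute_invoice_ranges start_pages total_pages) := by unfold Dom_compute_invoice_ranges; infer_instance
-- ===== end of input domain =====

-- B replaces A's forward enumerate loop with its index-bounds branch by a backward pass
-- that threads the next range's exclusive boundary through an accumulator; objective: alternative.

-- ===== PORT A =====
-- for idx, start in enumerate(start_pages): end = start_pages[idx+1]-1 if idx < len-1 else total_pages-1; ranges.append(...)
-- start_pages[idx+1] is always in range when the branch is taken, so the .getD 0 default is never used (A never raises).
def compute_invoice_ranges (start_pages : List Int) (total_pages : Int) : List (Int × Int) :=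
  (PySem.List.enumerate start_pages).foldl
    (fun ranges p =>
      let e : Int :=
        if p.1 < (start_pages.length : Int) - 1 then
          (PySem.List.pyGet? start_pages (p.1 + 1)).getD 0 - 1
        else
          total_pages - 1
      ranges ++ [(p.2, e)]) []

-- ===== PORT B =====
-- bound = total_pages; for s in reversed(start_pages): out.append((s, bound-1)); bound = s; out.reverse()
def compute_invoice_ranges_alt (start_pages : List Int) (total_pages : Int) : List (Int × Int) :=
  let st := start_pages.reverse.foldl
    (fun (st : Int × List (Int × Int)) s => (s, st.2 ++ [(s, st.1 - 1)]))
    (total_pages, ([] : List (Int × Int)))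
  st.2.reverse

-- ===== PRECONDITION & SPEC =====
def Spec_compute_invoice_ranges (start_pages : List Int) (total_pages : Int) (out : List (Int × Int)) : Prop := out = compute_invoice_ranges_alt start_pages total_pages
instance (start_pages : List Int) (total_pages : Int) (out : List (Int × Int)) : Decidable (Spec_compute_invoice_ranges start_pages total_pages out) := by unfold Spec_compute_invoice_ranges; infer_instance

-- ===== CLAIM (what is proved, stated in full; the proofs are below) =====
def Claim_equal_compute_invoice_ranges : Prop := ∀ (start_pages : List Int) (total_pages : Int), Dom_compute_invoice_ranges start_pages total_pages → Spec_compute_invoice_ranges start_pages total_pages (compute_invoice_ranges start_pages total_pages)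

-- ===== LEMMAS AND PROOFS =====

-- Reference recursion both ports are reduced to.
def gRanges (start_pages : List Int) (total_pages : Int) : List (Int × Int) :=
  match start_pages with
  | [] => []
  | s :: rest =>
    (s, (match rest with | [] => total_pages | s2 :: _ => s2) - 1) :: gRanges rest total_pages

theorem gRanges_length (sp : List Int) (tp : Int) : (gRanges sp tp).length = sp.length := by
  induction sp with
  | nil => rfl
  | cons s rest ih => simp [gRanges, ih]

theorem gRanges_getElem (sp : List Int) (tp : Int) (i : Nat) (h : i < sp.length) :
    (gRanges sp tp)[i]'(by rw [gRanges_length]; exact h) =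
      (sp[i], (if h2 : i + 1 < sp.length then sp[i+1] else tp) - 1) := by
  induction sp generalizing i with
  | nil => simp at h
  | cons s rest ih =>
    cases i with
    | zero =>
      cases rest with
      | nil => simp [gRanges]
      | cons s2 r2 => simp [gRanges]
    | succ j =>
      have hj : j < rest.length := by simpa using h
      have := ih j hj
      simp only [gRanges, List.getElem_cons_succ, this]
      by_cases h2 : j + 1 < rest.length
      · have h3 : j + 1 + 1 < (s :: rest).length := by simp only [List.length_cons]; omega
        simp only [dif_pos h2, dif_pos h3]
      · have h3 : ¬ (j + 1 + 1 < (s :: rest).length) := by simp only [List.length_cons]; omega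
        simp only [dif_neg h2, dif_neg h3]

-- A's foldl-append loop is the map of its body over the enumeration.
theorem foldl_append_map {α β : Type} (f : α → β) (l : List α) (init : List β) :
    l.foldl (fun acc x => acc ++ [f x]) init = init ++ l.map f := by
  induction l generalizing init with
  | nil => simp
  | cons x xs ih => simp [List.foldl_cons, ih]

theorem a_eq_g (sp : List Int) (tp : Int) :
    compute_invoice_ranges sp tp = gRanges sp tp := by
  unfold compute_invoice_ranges
  rw [foldl_append_map, List.nil_append]
  apply List.ext_getElem
  · simp [PySem.List.length_enumerate, gRanges_length]
  · intro i h1 h2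
    simp only [List.length_map, PySem.List.length_enumerate] at h1
    rw [gRanges_getElem sp tp i h1]
    simp only [List.getElem_map, PySem.List.getElem_enumerate]
    by_cases hc : (i : Int) < (sp.length : Int) - 1
    · have hi : i + 1 < sp.length := by omega
      have hget : PySem.List.pyGet? sp ((0 : Int) + (i : Int) + 1) = some sp[i+1] := by
        have h := PySem.List.pyGet?_natCast sp (i + 1)
        rw [List.getElem?_eq_getElem hi] at h
        rw [show (0 : Int) + (i : Int) + 1 = ((i + 1 : Nat) : Int) by push_cast; ring]
        exact h
      rw [if_pos (by omega), hget, dif_pos hi]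
      simp
    · have : ¬ (i + 1 < sp.length) := by omega
      rw [if_neg (by omega), dif_neg this]

-- The backward fold computes (current head boundary, reversed gRanges).
theorem b_fold_eq (sp : List Int) (tp : Int) :
    sp.foldr (fun s (st : Int × List (Int × Int)) => (s, st.2 ++ [(s, st.1 - 1)])) (tp, []) =
      ((match sp with | [] => tp | s :: _ => s), (gRanges sp tp).reverse) := by
  induction sp with
  | nil => simp [gRanges]
  | cons s rest ih =>
    simp only [List.foldr_cons, ih, gRanges, List.reverse_cons]

theorem b_eq_g (sp : List Int) (tp : Int) :
    compute_invoice_ranges_alt sp tp = gRanges sp tp := by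
  unfold compute_invoice_ranges_alt
  rw [List.foldl_reverse]
  have := b_fold_eq sp tp
  simp only [this]
  exact List.reverse_reverse _

-- ===== VERDICT (by name: the statement is the Claim_ definition above) =====
theorem compute_invoice_ranges_spec : Claim_equal_compute_invoice_ranges := by
  intro sp tp _
  unfold Spec_compute_invoice_ranges
  rw [a_eq_g, b_eq_g]
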